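-- pv_equiv track=rewrite | github.com/omertasgithub/data-structures-and-algorithms | leet code/Array/1732. Find the Highest Altitude.py | largestAltitude2
-- ===== SOURCE A (Python) =====
-- def largestAltitude2(gain):
--     current = 0
--     maxim = 0
--     for i,n in enumerate(gain):
--
--
--         current = current + n
--         if maxim < current:
--             maxim = current
--     return maxim
-- ===== SOURCE B (Python) =====
-- def largestAltitude2(gain):
--     # Right-to-left scan: best = highest altitude reachable (relative to the
--     # current position, never below the baseline 0) from this suffix onward.
--     # Answer = best for the whole list, since the maximum prefix sum satisfies
--     # maxpre(g0::rest) = max(0, g0 + maxpre(rest)).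
--     best = 0
--     for n in reversed(gain):
--         best = n + best
--         if best < 0:
--             best = 0
--     return best
-- ===== Notes on version B (the rewrite author's own statement) =====
-- stated objective: alternative
-- what changed: Scans the gains right-to-left maintaining the best altitude reachable from each suffix start (best = max(0, n + best)), using the recurrence maxprefix(g0::rest) = max(0, g0 + maxprefix(rest)), instead of A's left-to-right prefix-sum with a running maximum.
import Mathlib
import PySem

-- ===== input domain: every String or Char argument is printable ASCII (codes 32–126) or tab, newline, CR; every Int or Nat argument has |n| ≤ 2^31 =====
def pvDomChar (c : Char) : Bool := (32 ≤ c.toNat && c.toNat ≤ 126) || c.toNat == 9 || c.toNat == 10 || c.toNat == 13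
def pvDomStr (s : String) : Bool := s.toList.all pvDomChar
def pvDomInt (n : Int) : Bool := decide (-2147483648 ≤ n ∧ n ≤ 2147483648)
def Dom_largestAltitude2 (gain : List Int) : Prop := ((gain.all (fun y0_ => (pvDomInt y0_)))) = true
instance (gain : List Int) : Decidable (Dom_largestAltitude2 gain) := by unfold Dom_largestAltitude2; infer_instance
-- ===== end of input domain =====

-- B replaces A's left-to-right prefix-sum loop with a right-to-left scan of the best altitude reachable from each suffix (alternative decomposition; same O(n) cost).


-- ===== PORT A =====
-- literal port of A: one forward loop carrying (current, maxim)
def largestAltitude2 (gain : List Int) : Int :=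
  (gain.foldl (fun (s : Int × Int) n =>
    let current := s.1 + n
    (current, if s.2 < current then current else s.2)) (0, 0)).2

-- ===== PORT B =====
-- port of B: 'for n in reversed(gain)' updating best = max(0, n + best) is a right fold
def largestAltitude2_alt (gain : List Int) : Int :=
  gain.foldr (fun n best =>
    let b := n + best
    if b < 0 then 0 else b) 0

-- ===== PRECONDITION & SPEC =====
def Spec_largestAltitude2 (gain : List Int) (out : Int) : Prop := out = largestAltitude2_alt gain
instance (gain : List Int) (out : Int) : Decidable (Spec_largestAltitude2 gain out) := by unfold Spec_largestAltitude2; infer_instance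

-- ===== CLAIM (what is proved, stated in full; the proofs are below) =====
def Claim_equal_largestAltitude2 : Prop := ∀ (gain : List Int), Dom_largestAltitude2 gain → Spec_largestAltitude2 gain (largestAltitude2 gain)

-- ===== LEMMAS AND PROOFS =====

-- A's fold from state (c, m): the result is m if the list is empty, and otherwise
-- max m (c + head + B's value on the tail), since B's foldr value on the tail is the
-- best (never below 0) continuation of the running sum c + head.
lemma foldA_eq (l : List Int) : ∀ c m : Int,
    (l.foldl (fun (s : Int × Int) n =>
      let current := s.1 + n
      (current, if s.2 < current then current else s.2)) (c, m)).2
    = match l with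
      | [] => m
      | n :: rest => max m (c + n + largestAltitude2_alt rest) := by
  induction l with
  | nil => intro c m; rfl
  | cons n rest ih =>
    intro c m
    simp only [List.foldl_cons]
    rw [ih]
    cases rest with
    | nil => simp only [largestAltitude2_alt, List.foldr_nil]; split_ifs <;> omega
    | cons n2 r2 =>
      simp only [largestAltitude2_alt, List.foldr_cons]
      split_ifs <;> omega

-- ===== VERDICT (by name: the statement is the Claim_ definition above) =====
theorem largestAltitude2_spec : Claim_equal_largestAltitude2 := by
  intro gain _
  unfold Spec_largestAltitude2 largestAltitude2
  rw [foldA_eq]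
  cases gain with
  | nil => rfl
  | cons n rest =>
    simp only [largestAltitude2_alt, List.foldr_cons]
    split_ifs <;> omega
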